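-- pv_equiv track=rewrite | github.com/JohnnyHowe/python-command-line-helpers | pretty_command.py | _get_command_line_parts
-- ===== SOURCE A (Python) =====
-- import shlex
-- from typing import Iterable
--
-- def _get_command_line_parts(command: list[str]) -> Iterable[str]:
--     part_index = 0
--     while part_index < len(command):
--         part = command[part_index]
--         next_part = None if part_index >= len(command) - 1 else command[part_index + 1]
--
--         if next_part is not None and part.startswith("-") and not next_part.startswith("-"):
--             part_index += 2
--             yield f"{part} {shlex.quote(next_part)}"
--         else:
--             part_index += 1
--             yield part
-- ===== SOURCE B (Python) =====
-- import re
--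
-- _UNSAFE = re.compile(r"[^\w@%+=:,./-]", re.ASCII)
--
--
-- def _shell_quote(s: str) -> str:
--     """Return a shell-escaped version of the string s (POSIX)."""
--     if not s:
--         return "''"
--     if _UNSAFE.search(s) is None:
--         return s
--     return "'" + s.replace("'", "'\"'\"'") + "'"
--
--
-- def _get_command_line_parts(command: list[str]) -> list[str]:
--     out = []
--     held = None  # a flag waiting for a possible value
--     for part in command:
--         if held is not None:
--             if not part.startswith("-"):
--                 out.append(f"{held} {_shell_quote(part)}")
--                 held = None
--                 continue
--             out.append(held)
--             held = None
--         if part.startswith("-"):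
--             held = part
--         else:
--             out.append(part)
--     if held is not None:
--         out.append(held)
--     return out
-- ===== Notes on version B (the rewrite author's own statement) =====
-- stated objective: simpler
-- what changed: Replaced A's index-based while loop with explicit lookahead (command[part_index+1], advancing by 1 or 2) by a single forward pass that buffers at most one pending flag and flushes it after the loop, with the POSIX shell quoting written directly via a re-based helper.
import Mathlib
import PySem

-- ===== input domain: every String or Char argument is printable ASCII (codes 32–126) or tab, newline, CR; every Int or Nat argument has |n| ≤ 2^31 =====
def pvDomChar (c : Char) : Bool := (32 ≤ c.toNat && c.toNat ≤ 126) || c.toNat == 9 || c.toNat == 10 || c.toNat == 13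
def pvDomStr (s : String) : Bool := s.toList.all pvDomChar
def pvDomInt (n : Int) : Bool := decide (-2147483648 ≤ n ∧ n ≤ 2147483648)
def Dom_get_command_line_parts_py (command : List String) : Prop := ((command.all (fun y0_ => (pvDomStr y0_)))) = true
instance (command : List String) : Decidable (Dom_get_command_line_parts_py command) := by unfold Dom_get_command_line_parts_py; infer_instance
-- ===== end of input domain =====

-- B replaces A's index arithmetic and lookahead with a single forward pass that buffers at
-- most one pending flag (objective: simpler). Return-value equivalence; A is a generator,
-- compared as the list it yields.

-- shlex.quote, shared by both ports (both Pythons call it): exact on the ASCII domain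
-- (Python's \w is [A-Za-z0-9_] there).
def pyShlexSafeChar (c : Char) : Bool :=
  c.isAlphanum || c = '_' || c = '@' || c = '%' || c = '+' || c = '=' ||
  c = ':' || c = ',' || c = '.' || c = '/' || c = '-'

def pyShlexQuote (s : String) : String :=
  if s = "" then "''"
  else if s.toList.all pyShlexSafeChar then s
  else "'" ++ PySem.Str.replace s "'" "'\"'\"'" ++ "'"

-- ===== PORT A =====
-- A's while loop over part_index, advancing by 2 when a flag is paired with the following
-- non-flag, else by 1; written as recursion on the suffix from part_index.
def get_command_line_parts_py (command : List String) : List String :=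
  match command with
  | [] => []
  | [part] => [part]  -- next_part is None
  | part :: next_part :: rest =>
    if PySem.Str.startswith part "-" && !(PySem.Str.startswith next_part "-") then
      (part ++ " " ++ pyShlexQuote next_part) :: get_command_line_parts_py rest
    else
      part :: get_command_line_parts_py (next_part :: rest)

-- ===== PORT B =====
-- Source B's loop: `held` is the buffered flag (none = no flag held).
def bLoop (held : Option String) (l : List String) : List String :=
  match held, l with
  | none, [] => []
  | some h, [] => [h]
  | none, part :: rest =>
    if PySem.Str.startswith part "-" then bLoop (some part) rest
    else part :: bLoop none rest
  | some h, part :: rest =>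
    if !(PySem.Str.startswith part "-") then
      (h ++ " " ++ pyShlexQuote part) :: bLoop none rest
    else
      h :: bLoop (some part) rest

def get_command_line_parts_py_alt (command : List String) : List String :=
  bLoop none command

-- ===== PRECONDITION & SPEC =====
def Spec_get_command_line_parts_py (command : List String) (out : List String) : Prop := out = get_command_line_parts_py_alt command
instance (command : List String) (out : List String) : Decidable (Spec_get_command_line_parts_py command out) := by unfold Spec_get_command_line_parts_py; infer_instance

-- ===== CLAIM (what is proved, stated in full; the proofs are below) =====
def Claim_equal_get_command_line_parts_py : Prop := ∀ (command : List String), Dom_get_command_line_parts_py command → Spec_get_command_line_parts_py command (get_command_line_parts_py command)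

-- ===== LEMMAS AND PROOFS =====
theorem bLoop_eq (l : List String) :
    bLoop none l = get_command_line_parts_py l ∧
    ∀ h, PySem.Str.startswith h "-" = true →
      bLoop (some h) l = get_command_line_parts_py (h :: l) := by
  induction l with
  | nil => simp [bLoop, get_command_line_parts_py]
  | cons part rest ih =>
    obtain ⟨ih1, ih2⟩ := ih
    constructor
    · rw [show bLoop none (part :: rest) =
          (if PySem.Str.startswith part "-" = true then bLoop (some part) rest
           else part :: bLoop none rest) from rfl]
      by_cases hp : PySem.Str.startswith part "-" = true
      · rw [if_pos hp, ih2 part hp]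
      · rw [if_neg hp, ih1]
        cases rest with
        | nil => rfl
        | cons q t =>
          simp only [PySem.Str.startswith_eq, show ("-" : String).toList = ['-'] from rfl] at hp
          simp [get_command_line_parts_py, hp]
    · intro h hh
      rw [show bLoop (some h) (part :: rest) =
          (if (!PySem.Str.startswith part "-") = true then
            (h ++ " " ++ pyShlexQuote part) :: bLoop none rest
           else h :: bLoop (some part) rest) from rfl]
      by_cases hp : PySem.Str.startswith part "-" = true
      · rw [if_neg (by simp only [PySem.Str.startswith_eq, show ("-" : String).toList = ['-'] from rfl] at hp; simp [hp]), ih2 part hp]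
        simp only [PySem.Str.startswith_eq, show ("-" : String).toList = ['-'] from rfl] at hp hh
        simp [get_command_line_parts_py, hh, hp]
      · rw [if_pos (by simp only [PySem.Str.startswith_eq, show ("-" : String).toList = ['-'] from rfl] at hp; simp [hp]), ih1]
        simp only [PySem.Str.startswith_eq, show ("-" : String).toList = ['-'] from rfl] at hh
        simp only [PySem.Str.startswith_eq, show ("-" : String).toList = ['-'] from rfl, Bool.not_eq_true] at hp
        simp [get_command_line_parts_py, hh, hp]

-- ===== VERDICT (by name: the statement is the Claim_ definition above) =====
theorem get_command_line_parts_py_spec : Claim_equal_get_command_line_parts_py := by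
  intro command _
  unfold Spec_get_command_line_parts_py get_command_line_parts_py_alt
  exact (bLoop_eq command).1.symm
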